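-- pv_equiv track=rewrite | github.com/IvanYachUkr/TerraPulse | scripts/run_mlp_mega_sweep_v2.py | partition_features
-- ===== SOURCE A (Python) =====
-- def partition_features(core_cols, full_cols):
--     """Split columns into semantic groups spanning both core and full."""
--     band_prefixes = {"B02", "B03", "B04", "B05", "B06", "B07", "B08", "B8A", "B11", "B12"}
--     index_prefixes = {
--         "NDVI", "NDWI", "NDBI", "NDMI", "NBR", "SAVI", "BSI",
--         "NDRE1", "NDRE2", "EVI", "MSAVI", "CRI1", "CRI2", "MCARI", "MNDWI", "TC",
--     }
--
--     # Core groups (by index into full_cols)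
--     bands_idx, indices_idx, deltas_idx = [], [], []
--     hog_idx, gabor_idx, lbp_idx, glcm_idx, mp_idx, sv_idx = [], [], [], [], [], []
--     other_idx = []
--
--     for i, col in enumerate(full_cols):
--         prefix = col.split("_")[0]
--         if col.startswith("delta"):
--             deltas_idx.append(i)
--         elif prefix in band_prefixes:
--             bands_idx.append(i)
--         elif prefix in index_prefixes:
--             indices_idx.append(i)
--         elif prefix == "HOG":
--             hog_idx.append(i)
--         elif prefix == "Gabor":
--             gabor_idx.append(i)
--         elif prefix == "LBP":
--             lbp_idx.append(i)
--         elif prefix == "GLCM":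
--             glcm_idx.append(i)
--         elif prefix == "MP":
--             mp_idx.append(i)
--         elif prefix == "SV":
--             sv_idx.append(i)
--         else:
--             other_idx.append(i)
--
--     texture_all = hog_idx + gabor_idx + lbp_idx + glcm_idx + mp_idx + sv_idx
--     bands_indices = bands_idx + indices_idx
--
--     core_set = set(core_cols)
--     extra_only = [i for i, c in enumerate(full_cols) if c not in core_set]
--
--     return {
--         "bands_indices": bands_indices,
--         "texture_all": texture_all,
--         "bands_indices_texture": bands_indices + texture_all,
--         "bands_indices_hog": bands_indices + hog_idx,
--         "bands_indices_glcm_lbp": bands_indices + glcm_idx + lbp_idx,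
--         "full_no_deltas": bands_indices + texture_all + other_idx,
--         "extra_only": extra_only,
--         "all_full": list(range(len(full_cols))),
--         "hog_only": hog_idx,
--         "glcm_only": glcm_idx,
--         "gabor_only": gabor_idx,
--     }
-- ===== SOURCE B (Python) =====
-- def partition_features(core_cols, full_cols):
--     """Split columns into semantic groups spanning both core and full."""
--     band_prefixes = {"B02", "B03", "B04", "B05", "B06", "B07", "B08", "B8A", "B11", "B12"}
--     index_prefixes = {
--         "NDVI", "NDWI", "NDBI", "NDMI", "NBR", "SAVI", "BSI",
--         "NDRE1", "NDRE2", "EVI", "MSAVI", "CRI1", "CRI2", "MCARI", "MNDWI", "TC",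
--     }
--     texture_cats = {"HOG", "Gabor", "LBP", "GLCM", "MP", "SV"}
--
--     def cat(col):
--         if col.startswith("delta"):
--             return "deltas"
--         p = col.split("_")[0]
--         if p in band_prefixes:
--             return "bands"
--         if p in index_prefixes:
--             return "indices"
--         if p in texture_cats:
--             return p
--         return "other"
--
--     cats = [cat(c) for c in full_cols]
--
--     def pick(*names):
--         return [i for n in names for i, c in enumerate(cats) if c == n]
--
--     core_set = set(core_cols)
--     return {
--         "bands_indices": pick("bands", "indices"),
--         "texture_all": pick("HOG", "Gabor", "LBP", "GLCM", "MP", "SV"),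
--         "bands_indices_texture": pick("bands", "indices", "HOG", "Gabor", "LBP", "GLCM", "MP", "SV"),
--         "bands_indices_hog": pick("bands", "indices", "HOG"),
--         "bands_indices_glcm_lbp": pick("bands", "indices", "GLCM", "LBP"),
--         "full_no_deltas": pick("bands", "indices", "HOG", "Gabor", "LBP", "GLCM", "MP", "SV", "other"),
--         "extra_only": [i for i, c in enumerate(full_cols) if c not in core_set],
--         "all_full": list(range(len(full_cols))),
--         "hog_only": pick("HOG"),
--         "glcm_only": pick("GLCM"),
--         "gabor_only": pick("Gabor"),
--     }
-- ===== Notes on version B (the rewrite author's own statement) =====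
-- stated objective: alternative
-- what changed: Replaces the 11-way if/elif accumulator loop over ten named lists with a classify-once pass (one category label per column) followed by declarative per-category filters that assemble each output group directly.
import Mathlib
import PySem

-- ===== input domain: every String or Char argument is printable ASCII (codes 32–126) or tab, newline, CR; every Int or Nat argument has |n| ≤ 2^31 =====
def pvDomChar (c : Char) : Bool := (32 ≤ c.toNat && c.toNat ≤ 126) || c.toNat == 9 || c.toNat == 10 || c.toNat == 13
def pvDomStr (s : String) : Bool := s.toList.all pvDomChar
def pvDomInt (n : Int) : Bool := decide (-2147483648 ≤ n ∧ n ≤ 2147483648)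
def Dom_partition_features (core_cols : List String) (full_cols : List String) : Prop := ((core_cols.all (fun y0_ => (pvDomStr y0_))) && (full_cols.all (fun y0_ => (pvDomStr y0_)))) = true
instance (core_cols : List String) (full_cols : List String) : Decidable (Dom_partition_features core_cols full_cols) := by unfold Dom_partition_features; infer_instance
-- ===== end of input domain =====

-- B replaces A's 11-way if/elif accumulator loop over ten named lists with a classify-once pass
-- (one category label per column) plus per-category filters assembling each group (alternative decomposition, same cost).


-- ===== PORT A =====
def pvBandPrefixes : PySem.Set String :=
  PySem.Set.ofList ["B02", "B03", "B04", "B05", "B06", "B07", "B08", "B8A", "B11", "B12"]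

def pvIndexPrefixes : PySem.Set String :=
  PySem.Set.ofList ["NDVI", "NDWI", "NDBI", "NDMI", "NBR", "SAVI", "BSI",
    "NDRE1", "NDRE2", "EVI", "MSAVI", "CRI1", "CRI2", "MCARI", "MNDWI", "TC"]

structure PFState where
  bands : List Int
  indices : List Int
  deltas : List Int
  hog : List Int
  gabor : List Int
  lbp : List Int
  glcm : List Int
  mp : List Int
  sv : List Int
  other : List Int
deriving Repr, DecidableEq

-- one iteration of A's for-loop (col.split("_")[0]: splitOn with a nonempty
-- separator always returns a nonempty list, so headD "" is exact)
def pfStep (s : PFState) (p : Int × String) : PFState :=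
  let i := p.1
  let col := p.2
  let pre := (((PySem.Str.split? col "_").getD []).headD "")
  if PySem.Str.startswith col "delta" then { s with deltas := s.deltas ++ [i] }
  else if pvBandPrefixes.contains pre then { s with bands := s.bands ++ [i] }
  else if pvIndexPrefixes.contains pre then { s with indices := s.indices ++ [i] }
  else if pre == "HOG" then { s with hog := s.hog ++ [i] }
  else if pre == "Gabor" then { s with gabor := s.gabor ++ [i] }
  else if pre == "LBP" then { s with lbp := s.lbp ++ [i] }
  else if pre == "GLCM" then { s with glcm := s.glcm ++ [i] }
  else if pre == "MP" then { s with mp := s.mp ++ [i] }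
  else if pre == "SV" then { s with sv := s.sv ++ [i] }
  else { s with other := s.other ++ [i] }

def partition_features (core_cols : List String) (full_cols : List String) : List (String × List Int) :=
  let s := (PySem.List.enumerate full_cols).foldl pfStep ⟨[], [], [], [], [], [], [], [], [], []⟩
  let texture_all := s.hog ++ s.gabor ++ s.lbp ++ s.glcm ++ s.mp ++ s.sv
  let bands_indices := s.bands ++ s.indices
  let core_set := PySem.Set.ofList core_cols
  let extra_only := ((PySem.List.enumerate full_cols).filter
      (fun p => !(PySem.Set.contains core_set p.2))).map (·.1)
  [("bands_indices", bands_indices),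
   ("texture_all", texture_all),
   ("bands_indices_texture", bands_indices ++ texture_all),
   ("bands_indices_hog", bands_indices ++ s.hog),
   ("bands_indices_glcm_lbp", bands_indices ++ s.glcm ++ s.lbp),
   ("full_no_deltas", bands_indices ++ texture_all ++ s.other),
   ("extra_only", extra_only),
   ("all_full", PySem.List.pyRange 0 full_cols.length 1),
   ("hog_only", s.hog),
   ("glcm_only", s.glcm),
   ("gabor_only", s.gabor)]

-- ===== PORT B =====
def pvTextureCats : PySem.Set String := PySem.Set.ofList ["HOG", "Gabor", "LBP", "GLCM", "MP", "SV"]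

def pfCat (col : String) : String :=
  if PySem.Str.startswith col "delta" then "deltas"
  else
    let p := (((PySem.Str.split? col "_").getD []).headD "")
    if pvBandPrefixes.contains p then "bands"
    else if pvIndexPrefixes.contains p then "indices"
    else if pvTextureCats.contains p then p
    else "other"

def pfPick (cats : List String) (names : List String) : List Int :=
  names.flatMap (fun n => ((PySem.List.enumerate cats).filter (fun p => p.2 == n)).map (·.1))

def partition_features_alt (core_cols : List String) (full_cols : List String) : List (String × List Int) :=
  let cats := full_cols.map pfCat
  let core_set := PySem.Set.ofList core_cols
  [("bands_indices", pfPick cats ["bands", "indices"]),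
   ("texture_all", pfPick cats ["HOG", "Gabor", "LBP", "GLCM", "MP", "SV"]),
   ("bands_indices_texture", pfPick cats ["bands", "indices", "HOG", "Gabor", "LBP", "GLCM", "MP", "SV"]),
   ("bands_indices_hog", pfPick cats ["bands", "indices", "HOG"]),
   ("bands_indices_glcm_lbp", pfPick cats ["bands", "indices", "GLCM", "LBP"]),
   ("full_no_deltas", pfPick cats ["bands", "indices", "HOG", "Gabor", "LBP", "GLCM", "MP", "SV", "other"]),
   ("extra_only", ((PySem.List.enumerate full_cols).filter
       (fun p => !(PySem.Set.contains core_set p.2))).map (·.1)),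
   ("all_full", PySem.List.pyRange 0 full_cols.length 1),
   ("hog_only", pfPick cats ["HOG"]),
   ("glcm_only", pfPick cats ["GLCM"]),
   ("gabor_only", pfPick cats ["Gabor"])]

-- ===== PRECONDITION & SPEC =====
def Spec_partition_features (core_cols : List String) (full_cols : List String) (out : List (String × List Int)) : Prop := out = partition_features_alt core_cols full_cols
instance (core_cols : List String) (full_cols : List String) (out : List (String × List Int)) : Decidable (Spec_partition_features core_cols full_cols out) := by unfold Spec_partition_features; infer_instance

-- ===== CLAIM (what is proved, stated in full; the proofs are below) =====
def Claim_equal_partition_features : Prop := ∀ (core_cols : List String) (full_cols : List String), Dom_partition_features core_cols full_cols → Spec_partition_features core_cols full_cols (partition_features core_cols full_cols)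

-- ===== LEMMAS AND PROOFS =====

-- indices (first components) of the enumerated pairs whose column classifies as n
def pickP (l : List (Int × String)) (n : String) : List Int :=
  (l.filter (fun p => pfCat p.2 == n)).map (·.1)

theorem pvTex_eq : pvTextureCats = ["HOG", "Gabor", "LBP", "GLCM", "MP", "SV"] := by decide

theorem pvTex_contains (q : String) :
    PySem.Set.contains pvTextureCats q =
      decide (q = "HOG" ∨ q = "Gabor" ∨ q = "LBP" ∨ q = "GLCM" ∨ q = "MP" ∨ q = "SV") := by
  rw [pvTex_eq]
  simp [PySem.Set.contains_eq_listContains]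

-- proof-only category enum, to keep case analysis away from string literals
inductive PFCat
  | deltas | bands | indices | hog | gabor | lbp | glcm | mp | sv | other
deriving DecidableEq

def catC (col : String) : PFCat :=
  let pre := ((PySem.Str.split? col "_").getD []).headD ""
  if PySem.Str.startswith col "delta" then .deltas
  else if pvBandPrefixes.contains pre then .bands
  else if pvIndexPrefixes.contains pre then .indices
  else if pre == "HOG" then .hog
  else if pre == "Gabor" then .gabor
  else if pre == "LBP" then .lbp
  else if pre == "GLCM" then .glcm
  else if pre == "MP" then .mp
  else if pre == "SV" then .sv
  else .other

def addC (s : PFState) (c : PFCat) (i : Int) : PFState :=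
  match c with
  | .deltas => { s with deltas := s.deltas ++ [i] }
  | .bands => { s with bands := s.bands ++ [i] }
  | .indices => { s with indices := s.indices ++ [i] }
  | .hog => { s with hog := s.hog ++ [i] }
  | .gabor => { s with gabor := s.gabor ++ [i] }
  | .lbp => { s with lbp := s.lbp ++ [i] }
  | .glcm => { s with glcm := s.glcm ++ [i] }
  | .mp => { s with mp := s.mp ++ [i] }
  | .sv => { s with sv := s.sv ++ [i] }
  | .other => { s with other := s.other ++ [i] }

def catName : PFCat → String
  | .deltas => "deltas"
  | .bands => "bands"
  | .indices => "indices"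
  | .hog => "HOG"
  | .gabor => "Gabor"
  | .lbp => "LBP"
  | .glcm => "GLCM"
  | .mp => "MP"
  | .sv => "SV"
  | .other => "other"

theorem pfStep_eq_addC (s : PFState) (i : Int) (col : String) :
    pfStep s (i, col) = addC s (catC col) i := by
  simp only [pfStep, catC]
  split_ifs <;> rfl

theorem pfCat_eq_catName (col : String) : pfCat col = catName (catC col) := by
  simp only [pfCat, catC, pvTex_contains]
  split_ifs <;> simp_all [catName]

theorem pfStep_eq (s : PFState) (i : Int) (col : String) :
    pfStep s (i, col) =
      { bands := s.bands ++ (if pfCat col == "bands" then [i] else [])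
        indices := s.indices ++ (if pfCat col == "indices" then [i] else [])
        deltas := s.deltas ++ (if pfCat col == "deltas" then [i] else [])
        hog := s.hog ++ (if pfCat col == "HOG" then [i] else [])
        gabor := s.gabor ++ (if pfCat col == "Gabor" then [i] else [])
        lbp := s.lbp ++ (if pfCat col == "LBP" then [i] else [])
        glcm := s.glcm ++ (if pfCat col == "GLCM" then [i] else [])
        mp := s.mp ++ (if pfCat col == "MP" then [i] else [])
        sv := s.sv ++ (if pfCat col == "SV" then [i] else [])
        other := s.other ++ (if pfCat col == "other" then [i] else []) } := by
  rw [pfStep_eq_addC, pfCat_eq_catName]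
  cases catC col <;> simp [addC, catName]

theorem pickP_cons (i : Int) (col : String) (t : List (Int × String)) (n : String) :
    pickP ((i, col) :: t) n = (if pfCat col == n then [i] else []) ++ pickP t n := by
  simp only [pickP, List.filter]
  split <;> simp_all

theorem pfFold (l : List (Int × String)) (s : PFState) :
    l.foldl pfStep s =
      { bands := s.bands ++ pickP l "bands"
        indices := s.indices ++ pickP l "indices"
        deltas := s.deltas ++ pickP l "deltas"
        hog := s.hog ++ pickP l "HOG"
        gabor := s.gabor ++ pickP l "Gabor"
        lbp := s.lbp ++ pickP l "LBP"
        glcm := s.glcm ++ pickP l "GLCM"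
        mp := s.mp ++ pickP l "MP"
        sv := s.sv ++ pickP l "SV"
        other := s.other ++ pickP l "other" } := by
  induction l generalizing s with
  | nil => simp [pickP]
  | cons p t ih =>
    obtain ⟨i, col⟩ := p
    simp only [List.foldl_cons, pfStep_eq, ih, pickP_cons, List.append_assoc]

theorem enum_map (full : List String) (s0 : Int) (n : String) :
    ((PySem.List.enumerate (full.map pfCat) s0).filter (fun p => p.2 == n)).map (·.1)
      = pickP (PySem.List.enumerate full s0) n := by
  induction full generalizing s0 with
  | nil => simp [pickP, PySem.List.enumerate]
  | cons c t ih =>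
    simp only [List.map_cons, PySem.List.enumerate_cons, pickP, List.filter] at *
    split <;> simp_all

-- ===== VERDICT (by name: the statement is the Claim_ definition above) =====
theorem partition_features_spec : Claim_equal_partition_features := by
  intro core_cols full_cols _
  unfold Spec_partition_features partition_features partition_features_alt pfPick
  rw [pfFold]
  simp [enum_map, List.append_assoc]
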